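-- pv_equiv track=rewrite | github.com/projeto-de-algoritmos-2025/Grafos1_leetcode | Grafos-1/Questão-847/Questão-847.py | menorCaminhoQueVisitaTodosOsNos
-- ===== SOURCE A (Python) =====
-- from collections import deque
--
-- def menorCaminhoQueVisitaTodosOsNos(grafo: list[list[int]]) -> int:
--     n = len(grafo)
--     todos_visitados = (1 << n) - 1
--
--     fila = deque()
--     visitados = set()
--
--     for i in range(n):
--         no_inicial = i
--         mascara_inicial = 1 << no_inicial
--         distancia_inicial = 0
--
--         fila.append((no_inicial, mascara_inicial, distancia_inicial))
--         visitados.add((no_inicial, mascara_inicial))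
--
--     while fila:
--         no_atual, mascara_atual, distancia_atual = fila.popleft()
--
--         if mascara_atual == todos_visitados:
--             return distancia_atual
--
--         for vizinho in grafo[no_atual]:
--             proximo_bit = 1 << vizinho
--             proxima_mascara = mascara_atual | proximo_bit
--             estado = (vizinho, proxima_mascara)
--
--             if estado not in visitados:
--                 visitados.add(estado)
--                 fila.append((vizinho, proxima_mascara, distancia_atual + 1))
--
--     return -1
-- ===== SOURCE B (Python) =====
-- def menorCaminhoQueVisitaTodosOsNos(grafo: list[list[int]]) -> int:
--     # Bellman-Ford-style relaxation over (node, visited-mask) states: keep a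
--     # distance table, repeatedly relax every outgoing edge of every known state
--     # until a full-mask state exists (or a fixpoint is reached), then answer =
--     # min distance over full-mask states, -1 if there is none.
--     n = len(grafo)
--     cheio = (1 << n) - 1
--     dist = {(i, 1 << i): 0 for i in range(n)}
--     mudou = True
--     while mudou and not any(m == cheio for (_, m) in dist):
--         mudou = False
--         for (no, m), d in list(dist.items()):
--             for v in grafo[no]:
--                 e = (v, m | (1 << v))
--                 if e not in dist or dist[e] > d + 1:
--                     dist[e] = d + 1
--                     mudou = True
--     finais = [d for (_, m), d in dist.items() if m == cheio]
--     return min(finais) if finais else -1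
-- ===== Notes on version B (the rewrite author's own statement) =====
-- stated objective: alternative
-- what changed: Replaces A's FIFO-queue BFS (deque of (node,mask,dist) triples, visited set, early return on first full-mask pop) by Bellman-Ford-style relaxation: a distance dictionary over (node,mask) states, rounds that relax every outgoing edge of every known state until a full-mask state exists or nothing changes, and the answer extracted as the minimum distance over full-mask entries.
-- outside the precondition, e.g. on menorCaminhoQueVisitaTodosOsNos([[1, 5], [0]]): A returns 1, B returns 1; on menorCaminhoQueVisitaTodosOsNos([[1], [0, 9]]): A returns 1, B returns 1
import Mathlib
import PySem

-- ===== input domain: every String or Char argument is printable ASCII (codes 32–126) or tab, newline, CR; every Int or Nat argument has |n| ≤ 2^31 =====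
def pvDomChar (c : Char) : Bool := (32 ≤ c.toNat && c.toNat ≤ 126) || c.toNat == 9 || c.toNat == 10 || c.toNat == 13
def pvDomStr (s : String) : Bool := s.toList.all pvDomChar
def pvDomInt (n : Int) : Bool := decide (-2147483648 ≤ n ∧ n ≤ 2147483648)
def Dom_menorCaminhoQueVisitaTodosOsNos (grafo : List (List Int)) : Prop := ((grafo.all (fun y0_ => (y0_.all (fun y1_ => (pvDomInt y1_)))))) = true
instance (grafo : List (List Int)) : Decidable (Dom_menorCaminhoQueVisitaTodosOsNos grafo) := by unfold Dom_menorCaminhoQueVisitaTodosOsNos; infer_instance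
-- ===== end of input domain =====

-- B replaces A's FIFO-queue BFS by Bellman-Ford-style fixpoint relaxation over a distance
-- dictionary on (node, mask) states, answering at the end by a minimum over full-mask entries
-- (objective: alternative; not faster).

-- ===== PORT A =====
-- A: multi-source BFS over (node, mask) states with a FIFO queue of (node, mask, dist) triples.
-- Masks are nonnegative Python ints, modelled as Nat; '1 << v' is '2 ^ v.toNat', exact for 0 ≤ v
-- (for v < 0 Python raises ValueError and for v ≥ len(grafo) it later raises IndexError: both outside Pre_).
-- 'grafo[no]' is PySem.List.pyGet?; the '.getD []' default is only reached outside Pre_.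
-- The while loop runs on fuel n * 2^n + 1, proved sufficient under Pre_ (each iteration pops one
-- queue element and every enqueue adds a fresh (node, mask) state to 'visitados').

-- inner 'for vizinho in grafo[no_atual]' loop of A, one popped element (no, mask, dist)
def pvStepA (grafo : List (List Int)) (no : Int) (mask : Nat) (dist : Int)
    (vis : PySem.Set (Int × Nat)) : PySem.Set (Int × Nat) × List (Int × Nat × Int) :=
  ((PySem.List.pyGet? grafo no).getD []).foldl
    (fun acc v =>
      let nm := mask ||| 2 ^ v.toNat
      if (v, nm) ∈ acc.1 then acc
      else (PySem.Set.add acc.1 (v, nm), acc.2 ++ [(v, nm, dist + 1)]))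
    (vis, [])

-- the 'while fila' loop of A
def pvLoopA (grafo : List (List Int)) (todos : Nat) :
    Nat → List (Int × Nat × Int) → PySem.Set (Int × Nat) → Int
  | _, [], _ => -1
  | 0, _ :: _, _ => -1
  | fuel + 1, (no, mask, dist) :: rest, vis =>
    if mask = todos then dist
    else
      let st := pvStepA grafo no mask dist vis
      pvLoopA grafo todos fuel (rest ++ st.2) st.1

def menorCaminhoQueVisitaTodosOsNos (grafo : List (List Int)) : Int :=
  let n := grafo.length
  let todos : Nat := 2 ^ n - 1
  let fila := (List.range n).map (fun (i : Nat) => ((i : Int), (2 ^ i : Nat), (0 : Int)))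
  let visitados : PySem.Set (Int × Nat) :=
    PySem.Set.ofList ((List.range n).map (fun (i : Nat) => ((i : Int), (2 ^ i : Nat))))
  pvLoopA grafo todos (n * 2 ^ n + 1) fila visitados

-- ===== PORT B =====
-- B: Bellman-Ford-style relaxation to a fixpoint.  'dist' is a dict (node, mask) → distance;
-- each round scans a snapshot of dist.items and relaxes every outgoing edge, setting 'mudou'
-- when some entry was written; the loop stops when a full-mask state exists or nothing changed,
-- and the answer is min over full-mask entries, else -1.
-- Same modelling of masks/indexing as in A's port.  The while loop runs on fuel n * 2^n + 1,
-- proved sufficient under Pre_ (every continuing round adds a fresh key; keys are bounded by n * 2^n).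

-- body of the inner 'for v in grafo[no]' loop of B, for one snapshot item it = ((no, m), d)
def pvRelaxEdge (it : (Int × Nat) × Int) (acc : PySem.Dict (Int × Nat) Int × Bool) (v : Int) :
    PySem.Dict (Int × Nat) Int × Bool :=
  let e : Int × Nat := (v, it.1.2 ||| 2 ^ v.toNat)
  match acc.1.get? e with
  | none => (acc.1.insert e (it.2 + 1), true)
  | some u => if u > it.2 + 1 then (acc.1.insert e (it.2 + 1), true) else acc

-- one snapshot item of the 'for (no, m), d in list(dist.items())' loop
def pvRelaxAlt (grafo : List (List Int)) (acc : PySem.Dict (Int × Nat) Int × Bool)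
    (it : (Int × Nat) × Int) : PySem.Dict (Int × Nat) Int × Bool :=
  ((PySem.List.pyGet? grafo it.1.1).getD []).foldl (pvRelaxEdge it) acc

-- one round: 'mudou = False; for (no, m), d in list(dist.items()): …'
def pvRoundAlt (grafo : List (List Int)) (dist : PySem.Dict (Int × Nat) Int) :
    PySem.Dict (Int × Nat) Int × Bool :=
  dist.items.foldl (pvRelaxAlt grafo) (dist, false)

-- the 'while mudou and not any(m == cheio for (_, m) in dist)' loop of B
def pvWhileAlt (grafo : List (List Int)) (cheio : Nat) : Nat → PySem.Dict (Int × Nat) Int → PySem.Dict (Int × Nat) Int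
  | 0, dist => dist
  | fuel + 1, dist =>
    if dist.keys.any (fun k => k.2 == cheio) then dist
    else
      let r := pvRoundAlt grafo dist
      if r.2 then pvWhileAlt grafo cheio fuel r.1 else r.1

-- 'finais = [d for (_, m), d in dist.items() if m == cheio]; return min(finais) if finais else -1'
def pvExtractAlt (cheio : Nat) (fin : PySem.Dict (Int × Nat) Int) : Int :=
  let finais := (fin.items.filter (fun it => it.1.2 == cheio)).map (fun it => it.2)
  match PySem.List.min? finais (fun x => x) with
  | some m => m
  | none => -1

def menorCaminhoQueVisitaTodosOsNos_alt (grafo : List (List Int)) : Int :=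
  let n := grafo.length
  let cheio : Nat := 2 ^ n - 1
  let dist0 : PySem.Dict (Int × Nat) Int :=
    (List.range n).foldl (fun (d : PySem.Dict (Int × Nat) Int) (i : Nat) => d.insert ((i : Int), (2 ^ i : Nat)) (0 : Int)) PySem.Dict.empty
  pvExtractAlt cheio (pvWhileAlt grafo cheio (n * 2 ^ n + 1) dist0)

-- ===== PRECONDITION & SPEC =====
-- Pre_ excludes graphs with ≥ 2 nodes and a neighbour outside [0, len(grafo)): there A raises
-- ValueError (1 << negative) or IndexError (grafo[v]) unless it happens to answer before popping
-- the bad state (no closed-form split exists; on the excluded inputs where A does return, e.g.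
-- [[1, 5], [0]], B returns the same value).  Graphs with ≤ 1 node always answer before any
-- entry is touched, so they are admitted.
def Pre_menorCaminhoQueVisitaTodosOsNos (grafo : List (List Int)) : Prop :=
  grafo.length ≤ 1 ∨ ∀ row ∈ grafo, ∀ v ∈ row, 0 ≤ v ∧ v < (grafo.length : Int)
instance (grafo : List (List Int)) : Decidable (Pre_menorCaminhoQueVisitaTodosOsNos grafo) := by
  unfold Pre_menorCaminhoQueVisitaTodosOsNos; infer_instance

def pvWitness_menorCaminhoQueVisitaTodosOsNos : List (List Int) := [[1], [0]]

def Spec_menorCaminhoQueVisitaTodosOsNos (grafo : List (List Int)) (out : Int) : Prop := out = menorCaminhoQueVisitaTodosOsNos_alt grafo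
instance (grafo : List (List Int)) (out : Int) : Decidable (Spec_menorCaminhoQueVisitaTodosOsNos grafo out) := by unfold Spec_menorCaminhoQueVisitaTodosOsNos; infer_instance

-- ===== CLAIM (what is proved, stated in full; the proofs are below) =====
def Claim_equal_menorCaminhoQueVisitaTodosOsNos : Prop := ∀ (grafo : List (List Int)), Dom_menorCaminhoQueVisitaTodosOsNos grafo → Pre_menorCaminhoQueVisitaTodosOsNos grafo → Spec_menorCaminhoQueVisitaTodosOsNos grafo (menorCaminhoQueVisitaTodosOsNos grafo)

-- ===== LEMMAS AND PROOFS =====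

-- proof-side helpers: the layered-BFS reference loop (frontier expansion), used to relate A and B

def pvTag (d : Int) (s : Int × Nat) : Int × Nat × Int := (s.1, s.2, d)

def pvEnt (d : Int) (s : Int × Nat) : (Int × Nat) × Int := (s, d)

def pvInnerB (mask : Nat)
    (acc : PySem.Set (Int × Nat) × List (Int × Nat)) (v : Int) :
    PySem.Set (Int × Nat) × List (Int × Nat) :=
  let nm := mask ||| 2 ^ v.toNat
  if (v, nm) ∈ acc.1 then acc
  else (PySem.Set.add acc.1 (v, nm), acc.2 ++ [(v, nm)])

def pvStepB (grafo : List (List Int))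
    (acc : PySem.Set (Int × Nat) × List (Int × Nat)) (s : Int × Nat) :
    PySem.Set (Int × Nat) × List (Int × Nat) :=
  ((PySem.List.pyGet? grafo s.1).getD []).foldl (pvInnerB s.2) acc

def pvLoopL (grafo : List (List Int)) (cheio : Nat) :
    Nat → List (Int × Nat) → PySem.Set (Int × Nat) → Int → Int
  | _, [], _, _ => -1
  | 0, _ :: _, _, _ => -1
  | fuel + 1, s :: tl, vis, d =>
    if (s :: tl).any (fun s => s.2 == cheio) then d
    else
      let st := (s :: tl).foldl (pvStepB grafo) (vis, [])
      pvLoopL grafo cheio fuel st.2 st.1 (d + 1)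

lemma pvInnerB_acc (mask : Nat) : ∀ (nbrs : List Int) (vis : PySem.Set (Int × Nat))
    (q : List (Int × Nat)),
    nbrs.foldl (pvInnerB mask) (vis, q)
      = ((nbrs.foldl (pvInnerB mask) (vis, [])).1,
         q ++ (nbrs.foldl (pvInnerB mask) (vis, [])).2) := by
  intro nbrs
  induction nbrs with
  | nil => intro vis q; simp
  | cons v rest ih =>
    intro vis q
    by_cases h : (v, mask ||| 2 ^ v.toNat) ∈ vis
    · simp only [List.foldl_cons, pvInnerB, h, if_true]
      exact ih vis q
    · simp only [List.foldl_cons, pvInnerB, h, if_false, List.nil_append]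
      rw [ih _ (q ++ [(v, mask ||| 2 ^ v.toNat)]), ih _ ([(v, mask ||| 2 ^ v.toNat)])]
      simp

def pvInnerA (mask : Nat) (dist : Int)
    (acc : PySem.Set (Int × Nat) × List (Int × Nat × Int)) (v : Int) :
    PySem.Set (Int × Nat) × List (Int × Nat × Int) :=
  let nm := mask ||| 2 ^ v.toNat
  if (v, nm) ∈ acc.1 then acc
  else (PySem.Set.add acc.1 (v, nm), acc.2 ++ [(v, nm, dist + 1)])

lemma pvInnerA_eq (mask : Nat) (dist : Int) : ∀ (nbrs : List Int)
    (vis : PySem.Set (Int × Nat)) (q : List (Int × Nat × Int)),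
    nbrs.foldl (pvInnerA mask dist) (vis, q)
      = ((nbrs.foldl (pvInnerB mask) (vis, [])).1,
         q ++ ((nbrs.foldl (pvInnerB mask) (vis, [])).2).map (pvTag (dist + 1))) := by
  intro nbrs
  induction nbrs with
  | nil => intro vis q; simp
  | cons v rest ih =>
    intro vis q
    by_cases h : (v, mask ||| 2 ^ v.toNat) ∈ vis
    · simp only [List.foldl_cons, pvInnerA, pvInnerB, h, if_true]
      exact ih vis q
    · simp only [List.foldl_cons, pvInnerA, pvInnerB, h, if_false, List.nil_append]
      rw [ih _ (q ++ [(v, mask ||| 2 ^ v.toNat, dist + 1)]),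
          pvInnerB_acc mask rest _ ([(v, mask ||| 2 ^ v.toNat)])]
      simp [pvTag]

lemma pvInnerB_structure (mask : Nat) : ∀ (nbrs : List Int) (vis : PySem.Set (Int × Nat)),
    (nbrs.foldl (pvInnerB mask) (vis, [])).1
      = vis ++ (nbrs.foldl (pvInnerB mask) (vis, [])).2 := by
  intro nbrs
  induction nbrs with
  | nil => intro vis; simp
  | cons v rest ih =>
    intro vis
    by_cases h : (v, mask ||| 2 ^ v.toNat) ∈ vis
    · simp only [List.foldl_cons, pvInnerB, h, if_true]
      exact ih vis
    · simp only [List.foldl_cons, pvInnerB, h, if_false, List.nil_append]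
      rw [pvInnerB_acc mask rest _ ([(v, mask ||| 2 ^ v.toNat)]),
          PySem.Set.add_of_not_mem h]
      simp only [ih (vis ++ [(v, mask ||| 2 ^ v.toNat)])]
      simp

lemma pvInnerB_nodup (mask : Nat) : ∀ (nbrs : List Int) (vis : PySem.Set (Int × Nat)),
    vis.Nodup → (nbrs.foldl (pvInnerB mask) (vis, [])).1.Nodup := by
  intro nbrs
  induction nbrs with
  | nil => intro vis h; simpa using h
  | cons v rest ih =>
    intro vis hnd
    by_cases h : (v, mask ||| 2 ^ v.toNat) ∈ vis
    · simp only [List.foldl_cons, pvInnerB, h, if_true]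
      exact ih vis hnd
    · simp only [List.foldl_cons, pvInnerB, h, if_false, List.nil_append]
      rw [pvInnerB_acc mask rest _ ([(v, mask ||| 2 ^ v.toNat)])]
      exact ih _ (PySem.Set.nodup_add _ _ hnd)

def pvValid (n : Nat) (s : Int × Nat) : Prop := 0 ≤ s.1 ∧ s.1 < (n : Int) ∧ s.2 < 2 ^ n

lemma pvInnerB_valid (n : Nat) (mask : Nat) (hm : mask < 2 ^ n) :
    ∀ (nbrs : List Int) (vis : PySem.Set (Int × Nat)),
    (∀ v ∈ nbrs, 0 ≤ v ∧ v < (n : Int)) → (∀ x ∈ vis, pvValid n x) →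
    ∀ x ∈ (nbrs.foldl (pvInnerB mask) (vis, [])).1, pvValid n x := by
  intro nbrs
  induction nbrs with
  | nil => intro vis _ hvis; simpa using hvis
  | cons v rest ih =>
    intro vis hnb hvis
    by_cases h : (v, mask ||| 2 ^ v.toNat) ∈ vis
    · simp only [List.foldl_cons, pvInnerB, h, if_true]
      exact ih vis (fun w hw => hnb w (List.mem_cons_of_mem _ hw)) hvis
    · simp only [List.foldl_cons, pvInnerB, h, if_false, List.nil_append]
      rw [pvInnerB_acc mask rest _ ([(v, mask ||| 2 ^ v.toNat)])]
      refine ih _ (fun w hw => hnb w (List.mem_cons_of_mem _ hw)) ?_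
      intro x hx
      rw [PySem.Set.add_of_not_mem h] at hx
      rcases List.mem_append.mp hx with hx | hx
      · exact hvis x hx
      · obtain ⟨hv0, hvn⟩ := hnb v List.mem_cons_self
        have hvtn : v.toNat < n := by omega
        have h2 : 2 ^ v.toNat < 2 ^ n := Nat.pow_lt_pow_right (by norm_num) hvtn
        simp only [List.mem_singleton] at hx
        subst hx
        exact ⟨hv0, hvn, Nat.or_lt_two_pow hm h2⟩

lemma pvStepB_eq_fold (grafo : List (List Int)) (s : Int × Nat)
    (acc : PySem.Set (Int × Nat) × List (Int × Nat)) :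
    pvStepB grafo acc s
      = ((PySem.List.pyGet? grafo s.1).getD []).foldl (pvInnerB s.2) acc := rfl

lemma pvStepB_acc (grafo : List (List Int)) (s : Int × Nat)
    (vis : PySem.Set (Int × Nat)) (q : List (Int × Nat)) :
    pvStepB grafo (vis, q) s
      = ((pvStepB grafo (vis, []) s).1, q ++ (pvStepB grafo (vis, []) s).2) := by
  rw [pvStepB_eq_fold, pvStepB_eq_fold]
  exact pvInnerB_acc _ _ _ _

lemma pvLayer_acc (grafo : List (List Int)) : ∀ (L : List (Int × Nat))
    (vis : PySem.Set (Int × Nat)) (q : List (Int × Nat)),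
    L.foldl (pvStepB grafo) (vis, q)
      = ((L.foldl (pvStepB grafo) (vis, [])).1,
         q ++ (L.foldl (pvStepB grafo) (vis, [])).2) := by
  intro L
  induction L with
  | nil => intro vis q; simp
  | cons s rest ih =>
    intro vis q
    simp only [List.foldl_cons]
    rw [pvStepB_acc grafo s vis q]
    rcases hS : pvStepB grafo (vis, []) s with ⟨S1, S2⟩
    rw [ih S1 (q ++ S2), ih S1 S2]
    simp

lemma pvLayer_structure (grafo : List (List Int)) : ∀ (L : List (Int × Nat))
    (vis : PySem.Set (Int × Nat)),
    (L.foldl (pvStepB grafo) (vis, [])).1 = vis ++ (L.foldl (pvStepB grafo) (vis, [])).2 := by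
  intro L
  induction L with
  | nil => intro vis; simp
  | cons s rest ih =>
    intro vis
    simp only [List.foldl_cons]
    rcases hS : pvStepB grafo (vis, []) s with ⟨S1, S2⟩
    have hstr : S1 = vis ++ S2 := by
      have := pvInnerB_structure s.2 ((PySem.List.pyGet? grafo s.1).getD []) vis
      rw [← pvStepB_eq_fold] at this
      simpa [hS] using this
    rw [pvLayer_acc grafo rest S1 S2, ih S1, hstr]
    simp

lemma pvLayer_nodup (grafo : List (List Int)) : ∀ (L : List (Int × Nat))
    (vis : PySem.Set (Int × Nat)),
    vis.Nodup → (L.foldl (pvStepB grafo) (vis, [])).1.Nodup := by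
  intro L
  induction L with
  | nil => intro vis h; simpa using h
  | cons s rest ih =>
    intro vis hnd
    simp only [List.foldl_cons]
    rcases hS : pvStepB grafo (vis, []) s with ⟨S1, S2⟩
    have hnd1 : S1.Nodup := by
      have := pvInnerB_nodup s.2 ((PySem.List.pyGet? grafo s.1).getD []) vis hnd
      rw [← pvStepB_eq_fold] at this
      simpa [hS] using this
    rw [pvLayer_acc grafo rest S1 S2]
    exact ih S1 hnd1

lemma pvPre_nbrs (grafo : List (List Int))
    (hpre : ∀ row ∈ grafo, ∀ v ∈ row, 0 ≤ v ∧ v < (grafo.length : Int))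
    (no : Int) : ∀ v ∈ (PySem.List.pyGet? grafo no).getD [], 0 ≤ v ∧ v < (grafo.length : Int) := by
  cases hrow : PySem.List.pyGet? grafo no with
  | none => simp
  | some row =>
    have hmem : row ∈ grafo := PySem.List.mem_of_pyGet?_eq_some _ hrow
    simpa using hpre row hmem

lemma pvLayer_valid (grafo : List (List Int))
    (hpre : ∀ row ∈ grafo, ∀ v ∈ row, 0 ≤ v ∧ v < (grafo.length : Int)) :
    ∀ (L : List (Int × Nat)) (vis : PySem.Set (Int × Nat)),
    (∀ s ∈ L, s.2 < 2 ^ grafo.length) → (∀ x ∈ vis, pvValid grafo.length x) →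
    ∀ x ∈ (L.foldl (pvStepB grafo) (vis, [])).1, pvValid grafo.length x := by
  intro L
  induction L with
  | nil => intro vis _ hvis; simpa using hvis
  | cons s rest ih =>
    intro vis hL hvis
    simp only [List.foldl_cons]
    rcases hS : pvStepB grafo (vis, []) s with ⟨S1, S2⟩
    have hv1 : ∀ x ∈ S1, pvValid grafo.length x := by
      have := pvInnerB_valid grafo.length s.2 (hL s List.mem_cons_self)
        ((PySem.List.pyGet? grafo s.1).getD []) vis (pvPre_nbrs grafo hpre s.1) hvis
      rw [← pvStepB_eq_fold] at this
      simpa [hS] using this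
    rw [pvLayer_acc grafo rest S1 S2]
    exact ih S1 (fun w hw => hL w (List.mem_cons_of_mem _ hw)) hv1

lemma pvLen_bound (n : Nat) (l : List (Int × Nat)) (hnd : l.Nodup)
    (hv : ∀ x ∈ l, pvValid n x) : l.length ≤ n * 2 ^ n := by
  have hsub : ∀ x ∈ l, x ∈ (Finset.Icc (0 : Int) ((n : Int) - 1)) ×ˢ Finset.range (2 ^ n) := by
    intro x hx
    obtain ⟨h0, h1, h2⟩ := hv x hx
    simp only [Finset.mem_product, Finset.mem_Icc, Finset.mem_range]
    exact ⟨⟨h0, by omega⟩, h2⟩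
  have hcard : ((Finset.Icc (0 : Int) ((n : Int) - 1)) ×ˢ Finset.range (2 ^ n)).card = n * 2 ^ n := by
    rw [Finset.card_product, Int.card_Icc, Finset.card_range]
    congr 1
    omega
  calc l.length = l.toFinset.card := (List.toFinset_card_of_nodup hnd).symm
    _ ≤ _ := Finset.card_le_card (fun x hx => hsub x (List.mem_toFinset.mp hx))
    _ = n * 2 ^ n := hcard

lemma pvStepA_eq (grafo : List (List Int)) (no : Int) (mask : Nat) (dist : Int)
    (vis : PySem.Set (Int × Nat)) :
    pvStepA grafo no mask dist vis
      = ((pvStepB grafo (vis, []) (no, mask)).1,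
         ((pvStepB grafo (vis, []) (no, mask)).2).map (pvTag (dist + 1))) := by
  have h1 : pvStepA grafo no mask dist vis
      = ((PySem.List.pyGet? grafo no).getD []).foldl (pvInnerA mask dist) (vis, []) := rfl
  rw [h1, pvInnerA_eq, pvStepB_eq_fold]
  simp

lemma pvLoopA_layer (grafo : List (List Int)) (todos : Nat) :
    ∀ (L M : List (Int × Nat)) (vis : PySem.Set (Int × Nat)) (d : Int) (fA : Nat),
    L.length < fA →
    pvLoopA grafo todos fA (L.map (pvTag d) ++ M.map (pvTag (d + 1))) vis
      = if L.any (fun s => s.2 == todos) then d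
        else pvLoopA grafo todos (fA - L.length)
          (((L.foldl (pvStepB grafo) (vis, M)).2).map (pvTag (d + 1)))
          (L.foldl (pvStepB grafo) (vis, M)).1 := by
  intro L
  induction L with
  | nil =>
    intro M vis d fA _
    simp only [List.map_nil, List.nil_append, List.any_nil, List.foldl_nil,
      List.length_nil, Nat.sub_zero, Bool.false_eq_true, if_false]
  | cons s L' ih =>
    intro M vis d fA hfA
    cases fA with
    | zero => omega
    | succ f =>
      rcases s with ⟨no, m⟩
      simp only [List.map_cons, List.cons_append, pvTag, List.foldl_cons, List.any_cons]
      rw [pvLoopA]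
      by_cases hm : m = todos
      · simp [hm]
      · have hne : (m == todos) = false := by simp [hm]
        simp only [hm, if_false, hne, Bool.false_or]
        rw [pvStepA_eq grafo no m d vis]
        have hq : (L'.map (pvTag d) ++ M.map (pvTag (d + 1)))
              ++ ((pvStepB grafo (vis, []) (no, m)).2).map (pvTag (d + 1))
            = L'.map (pvTag d) ++ (M ++ (pvStepB grafo (vis, []) (no, m)).2).map (pvTag (d + 1)) := by
          simp [List.map_append]
        have hstep : pvStepB grafo (vis, M) (no, m)
            = ((pvStepB grafo (vis, []) (no, m)).1, M ++ (pvStepB grafo (vis, []) (no, m)).2) :=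
          pvStepB_acc grafo (no, m) vis M
        rw [hq, ih (M ++ (pvStepB grafo (vis, []) (no, m)).2) _ d f (by simpa using Nat.lt_of_succ_lt_succ hfA)]
        rw [hstep]
        simp only [List.length_cons, Nat.add_sub_add_right]

lemma pvLoopA_nil (grafo : List (List Int)) (todos : Nat) (f : Nat)
    (vis : PySem.Set (Int × Nat)) : pvLoopA grafo todos f [] vis = -1 := by
  cases f <;> rfl

lemma pvLoopL_nil (grafo : List (List Int)) (todos : Nat) (f : Nat)
    (vis : PySem.Set (Int × Nat)) (d : Int) : pvLoopL grafo todos f [] vis d = -1 := by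
  cases f <;> rfl

lemma pvLoopA_eq_pvLoopL (grafo : List (List Int)) (todos : Nat)
    (hpre : ∀ row ∈ grafo, ∀ v ∈ row, 0 ≤ v ∧ v < (grafo.length : Int)) :
    ∀ (fB : Nat) (L : List (Int × Nat)) (vis : PySem.Set (Int × Nat)) (d : Int) (fA : Nat),
    (∀ x ∈ vis, pvValid grafo.length x) → vis.Nodup → (∀ s ∈ L, s ∈ vis) →
    L.length + (grafo.length * 2 ^ grafo.length - vis.length) < fA →
    grafo.length * 2 ^ grafo.length - vis.length < fB →
    vis.length ≤ grafo.length * 2 ^ grafo.length →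
    pvLoopA grafo todos fA (L.map (pvTag d)) vis = pvLoopL grafo todos fB L vis d := by
  intro fB
  induction fB with
  | zero => intro L vis d fA hv hnd hsub hfA hfB hlen; omega
  | succ fB ih =>
    intro L vis d fA hv hnd hsub hfA hfB hlen
    cases L with
    | nil =>
      simp only [List.map_nil]
      rw [pvLoopA_nil, pvLoopL_nil]
    | cons s tl =>
      have hlayer := pvLoopA_layer grafo todos (s :: tl) [] vis d fA (by
        simp only [List.length_cons] at hfA ⊢; omega)
      simp only [List.map_nil, List.append_nil] at hlayer
      rw [hlayer, pvLoopL]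
      by_cases hany : (s :: tl).any (fun s => s.2 == todos) = true
      · simp only [hany, if_true]
      · simp only [Bool.not_eq_true] at hany
        simp only [hany, Bool.false_eq_true, if_false]
        have hmask : ∀ s' ∈ s :: tl, s'.2 < 2 ^ grafo.length :=
          fun s' hs' => (hv s' (hsub s' hs')).2.2
        have hstr := pvLayer_structure grafo (s :: tl) vis
        have hnd' := pvLayer_nodup grafo (s :: tl) vis hnd
        have hval' := pvLayer_valid grafo hpre (s :: tl) vis hmask hv
        have hlen' := pvLen_bound grafo.length _ hnd' hval'
        have hlensum : ((s :: tl).foldl (pvStepB grafo) (vis, [])).1.length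
            = vis.length + ((s :: tl).foldl (pvStepB grafo) (vis, [])).2.length := by
          rw [hstr]; simp
        cases hF2 : ((s :: tl).foldl (pvStepB grafo) (vis, [])).2 with
        | nil =>
          simp only [List.map_nil]
          rw [pvLoopA_nil, pvLoopL_nil]
        | cons y ys =>
          rw [← hF2]
          apply ih
          · exact hval'
          · exact hnd'
          · intro x hx
            rw [hstr]
            exact List.mem_append_right _ hx
          · simp only [List.length_cons] at hfA ⊢
            omega
          · have : 1 ≤ ((s :: tl).foldl (pvStepB grafo) (vis, [])).2.length := by
              rw [hF2]; simp
            omega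
          · exact hlen'

-- ===== dict-side lemmas relating B's relaxation rounds to the layered expansion =====

lemma pvGet?_mk_append_left {κ ν : Type} [BEq κ] (L : List (κ × ν)) : ∀ (M : List (κ × ν)) (k : κ) (u : ν),
    (PySem.Dict.mk L).get? k = some u → (PySem.Dict.mk (L ++ M)).get? k = some u := by
  induction L with
  | nil => intro M k u h; simp [PySem.Dict.get?] at h
  | cons p rest ih =>
    obtain ⟨k0, v0⟩ := p
    intro M k u h
    rw [PySem.Dict.get?_mk_cons] at h
    rw [List.cons_append, PySem.Dict.get?_mk_cons]
    by_cases hk : (k0 == k) = true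
    · simpa [hk] using h
    · simp only [hk] at h ⊢
      exact ih M k u h

lemma pvInsert_mk_fresh (L : List ((Int × Nat) × Int)) (k : Int × Nat) (v : Int)
    (h : k ∉ L.map (·.1)) : (PySem.Dict.mk L).insert k v = PySem.Dict.mk (L ++ [(k, v)]) := by
  have hcont : (PySem.Dict.mk L).contains k = false := by
    rw [PySem.Dict.contains_eq_decide_mem_keys]
    simpa using h
  apply PySem.Dict.ext
  rw [PySem.Dict.items_insert, hcont]
  simp

lemma pvGet?_some_of_mem_keys {κ ν : Type} [BEq κ] [LawfulBEq κ] (d : PySem.Dict κ ν) (k : κ)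
    (h : k ∈ d.keys) : ∃ u, d.get? k = some u := by
  cases hg : d.get? k with
  | none => exact absurd h ((PySem.Dict.get?_eq_none_iff_not_mem_keys d k).mp hg)
  | some u => exact ⟨u, rfl⟩

lemma pvFoldEdges_noop (it : (Int × Nat) × Int) : ∀ (nbrs : List Int)
    (D : PySem.Dict (Int × Nat) Int) (b : Bool),
    (∀ v ∈ nbrs, ∃ u, D.get? (v, it.1.2 ||| 2 ^ v.toNat) = some u ∧ u ≤ it.2 + 1) →
    nbrs.foldl (pvRelaxEdge it) (D, b) = (D, b) := by
  intro nbrs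
  induction nbrs with
  | nil => intro D b _; rfl
  | cons v rest ih =>
    intro D b h
    obtain ⟨u, hu, hle⟩ := h v List.mem_cons_self
    have hstep : pvRelaxEdge it (D, b) v = (D, b) := by
      simp only [pvRelaxEdge, hu]
      rw [if_neg (by omega)]
    simp only [List.foldl_cons, hstep]
    exact ih D b (fun w hw => h w (List.mem_cons_of_mem _ hw))

lemma pvPhase1_noop (grafo : List (List Int)) : ∀ (P0 : List ((Int × Nat) × Int))
    (D : PySem.Dict (Int × Nat) Int) (b : Bool),
    (∀ it ∈ P0, ∀ v ∈ (PySem.List.pyGet? grafo it.1.1).getD [],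
      ∃ u, D.get? (v, it.1.2 ||| 2 ^ v.toNat) = some u ∧ u ≤ it.2 + 1) →
    P0.foldl (pvRelaxAlt grafo) (D, b) = (D, b) := by
  intro P0
  induction P0 with
  | nil => intro D b _; rfl
  | cons it rest ih =>
    intro D b h
    have hstep : pvRelaxAlt grafo (D, b) it = (D, b) :=
      pvFoldEdges_noop it _ D b (h it List.mem_cons_self)
    simp only [List.foldl_cons, hstep]
    exact ih D b (fun w hw => h w (List.mem_cons_of_mem _ hw))

lemma pvFoldEdges_fresh (s : Int × Nat) (d : Int) : ∀ (nbrs : List Int)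
    (L : List ((Int × Nat) × Int)) (b : Bool),
    (∀ it ∈ L, it.2 ≤ d + 1) →
    nbrs.foldl (pvRelaxEdge (s, d)) (PySem.Dict.mk L, b)
      = (PySem.Dict.mk (L ++ ((nbrs.foldl (pvInnerB s.2) (L.map (·.1), [])).2).map (pvEnt (d + 1))),
         b || !((nbrs.foldl (pvInnerB s.2) (L.map (·.1), [])).2.isEmpty)) := by
  intro nbrs
  induction nbrs with
  | nil => intro L b _; simp
  | cons v rest ih =>
    intro L b hval
    by_cases hmem : ((v, s.2 ||| 2 ^ v.toNat) : Int × Nat) ∈ L.map (·.1)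
    · obtain ⟨u, hu⟩ : ∃ u, (PySem.Dict.mk L).get? (v, s.2 ||| 2 ^ v.toNat) = some u := by
        cases hg : (PySem.Dict.mk L).get? (v, s.2 ||| 2 ^ v.toNat) with
        | none => exact absurd hmem ((PySem.Dict.get?_eq_none_iff_not_mem_keys _ _).mp hg)
        | some u => exact ⟨u, rfl⟩
      have hub : u ≤ d + 1 := hval _ (PySem.Dict.mem_items_of_get?_eq_some _ hu)
      have hstep : pvRelaxEdge (s, d) (PySem.Dict.mk L, b) v = (PySem.Dict.mk L, b) := by
        simp only [pvRelaxEdge, hu]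
        rw [if_neg (by omega)]
      simp only [List.foldl_cons, hstep, pvInnerB, hmem, if_true]
      exact ih L b hval
    · have hnone : (PySem.Dict.mk L).get? (v, s.2 ||| 2 ^ v.toNat) = none :=
        (PySem.Dict.get?_eq_none_iff_not_mem_keys _ _).mpr hmem
      have hstep : pvRelaxEdge (s, d) (PySem.Dict.mk L, b) v
          = (PySem.Dict.mk (L ++ [((v, s.2 ||| 2 ^ v.toNat), d + 1)]), true) := by
        simp only [pvRelaxEdge, hnone]
        rw [pvInsert_mk_fresh _ _ _ hmem]
      simp only [List.foldl_cons, hstep, pvInnerB, hmem, if_false, List.nil_append]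
      rw [ih (L ++ [((v, s.2 ||| 2 ^ v.toNat), d + 1)]) true (by
        intro it hit
        rcases List.mem_append.mp hit with h | h
        · exact hval it h
        · simp only [List.mem_singleton] at h; subst h; omega)]
      rw [PySem.Set.add_of_not_mem hmem]
      have hkeys : (L ++ [((v, s.2 ||| 2 ^ v.toNat), d + 1)]).map (·.1)
          = L.map (·.1) ++ [(v, s.2 ||| 2 ^ v.toNat)] := by simp
      rw [hkeys]
      rw [pvInnerB_acc s.2 rest (L.map (·.1) ++ [(v, s.2 ||| 2 ^ v.toNat)]) [(v, s.2 ||| 2 ^ v.toNat)]]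
      simp [pvEnt]

lemma pvPhase2 (grafo : List (List Int)) : ∀ (F0 : List (Int × Nat))
    (L : List ((Int × Nat) × Int)) (b : Bool) (d : Int),
    (∀ it ∈ L, it.2 ≤ d + 1) →
    (F0.map (pvEnt d)).foldl (pvRelaxAlt grafo) (PySem.Dict.mk L, b)
      = (PySem.Dict.mk (L ++ ((F0.foldl (pvStepB grafo) (L.map (·.1), [])).2).map (pvEnt (d + 1))),
         b || !((F0.foldl (pvStepB grafo) (L.map (·.1), [])).2.isEmpty)) := by
  intro F0
  induction F0 with
  | nil => intro L b d _; simp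
  | cons t rest ih =>
    intro L b d hval
    have hstep1 : pvRelaxAlt grafo (PySem.Dict.mk L, b) (pvEnt d t)
        = (PySem.Dict.mk (L ++ ((pvStepB grafo (L.map (·.1), []) t).2).map (pvEnt (d + 1))),
           b || !((pvStepB grafo (L.map (·.1), []) t).2.isEmpty)) := by
      show (((PySem.List.pyGet? grafo t.1).getD []).foldl (pvRelaxEdge (t, d)) (PySem.Dict.mk L, b)) = _
      rw [pvFoldEdges_fresh t d _ L b hval]
      rfl
    have hsplit : pvStepB grafo (L.map (·.1), []) t
        = (L.map (·.1) ++ (pvStepB grafo (L.map (·.1), []) t).2,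
           (pvStepB grafo (L.map (·.1), []) t).2) := by
      have h2 := pvInnerB_structure t.2 ((PySem.List.pyGet? grafo t.1).getD []) (L.map (·.1))
      rw [← pvStepB_eq_fold] at h2
      exact Prod.ext h2 rfl
    set N1 := (pvStepB grafo (L.map (·.1), []) t).2 with hN1
    have hval' : ∀ it ∈ L ++ N1.map (pvEnt (d + 1)), it.2 ≤ d + 1 := by
      intro it hit
      rcases List.mem_append.mp hit with h | h
      · exact hval it h
      · obtain ⟨x, _, rfl⟩ := List.mem_map.mp h
        simp [pvEnt]
    have hkeys' : (L ++ N1.map (pvEnt (d + 1))).map (·.1) = L.map (·.1) ++ N1 := by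
      simp [pvEnt, Function.comp_def]
    simp only [List.map_cons, List.foldl_cons, hstep1]
    rw [ih (L ++ N1.map (pvEnt (d + 1))) _ d hval']
    rw [hkeys']
    rw [hsplit]
    rw [pvLayer_acc grafo rest (L.map (·.1) ++ N1) N1]
    simp only [Prod.mk.injEq]
    constructor
    · simp
    · cases hE : N1 <;> simp

lemma pvRound_eq (grafo : List (List Int)) (P : List ((Int × Nat) × Int))
    (F : List (Int × Nat)) (d : Int)
    (hval : ∀ it ∈ P, it.2 + 1 ≤ d)
    (hC : ∀ it ∈ P, ∀ v ∈ (PySem.List.pyGet? grafo it.1.1).getD [],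
      ∃ u, (PySem.Dict.mk (P ++ F.map (pvEnt d))).get? (v, it.1.2 ||| 2 ^ v.toNat) = some u ∧ u ≤ it.2 + 1) :
    pvRoundAlt grafo (PySem.Dict.mk (P ++ F.map (pvEnt d)))
      = (PySem.Dict.mk (P ++ F.map (pvEnt d)
            ++ ((F.foldl (pvStepB grafo) (P.map (·.1) ++ F, [])).2).map (pvEnt (d + 1))),
         !((F.foldl (pvStepB grafo) (P.map (·.1) ++ F, [])).2.isEmpty)) := by
  have hitems : (PySem.Dict.mk (P ++ F.map (pvEnt d))).items = P ++ F.map (pvEnt d) := rfl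
  have hkeys : (P ++ F.map (pvEnt d)).map (·.1) = P.map (·.1) ++ F := by
    simp [pvEnt, Function.comp_def]
  have hval2 : ∀ it ∈ P ++ F.map (pvEnt d), it.2 ≤ d + 1 := by
    intro it hit
    rcases List.mem_append.mp hit with h | h
    · have := hval it h; omega
    · obtain ⟨x, _, rfl⟩ := List.mem_map.mp h
      simp [pvEnt]
  show (P ++ F.map (pvEnt d)).foldl (pvRelaxAlt grafo) (PySem.Dict.mk (P ++ F.map (pvEnt d)), false) = _
  rw [List.foldl_append]
  rw [pvPhase1_noop grafo P _ false hC]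
  rw [pvPhase2 grafo F (P ++ F.map (pvEnt d)) false d hval2]
  rw [hkeys]
  simp [List.append_assoc]

lemma pvInnerB_set_mono (mask : Nat) : ∀ (nbrs : List Int)
    (acc : PySem.Set (Int × Nat) × List (Int × Nat)) (x : Int × Nat),
    x ∈ acc.1 → x ∈ (nbrs.foldl (pvInnerB mask) acc).1 := by
  intro nbrs
  induction nbrs with
  | nil => intro acc x h; exact h
  | cons v rest ih =>
    intro acc x h
    simp only [List.foldl_cons]
    apply ih
    by_cases hm : ((v, mask ||| 2 ^ v.toNat) : Int × Nat) ∈ acc.1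
    · simpa [pvInnerB, hm] using h
    · simp only [pvInnerB, hm, if_false]
      simp [PySem.Set.mem_add, h]

lemma pvStepB_set_mono (grafo : List (List Int)) : ∀ (F0 : List (Int × Nat))
    (acc : PySem.Set (Int × Nat) × List (Int × Nat)) (x : Int × Nat),
    x ∈ acc.1 → x ∈ (F0.foldl (pvStepB grafo) acc).1 := by
  intro F0
  induction F0 with
  | nil => intro acc x h; exact h
  | cons t rest ih =>
    intro acc x h
    simp only [List.foldl_cons]
    exact ih _ x (pvInnerB_set_mono t.2 _ acc x h)

lemma pvSucc_mem (grafo : List (List Int)) : ∀ (F0 : List (Int × Nat))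
    (acc : PySem.Set (Int × Nat) × List (Int × Nat)),
    ∀ s ∈ F0, ∀ v ∈ (PySem.List.pyGet? grafo s.1).getD [],
      (v, s.2 ||| 2 ^ v.toNat) ∈ (F0.foldl (pvStepB grafo) acc).1 := by
  intro F0
  induction F0 with
  | nil => intro acc s hs; simp at hs
  | cons t rest ih =>
    intro acc s hs v hv
    rcases List.mem_cons.mp hs with hs | hs
    · subst hs
      simp only [List.foldl_cons]
      apply pvStepB_set_mono grafo rest
      -- e enters (or already is in) the set while expanding s itself
      have hin : ∀ (nbrs : List Int) (acc' : PySem.Set (Int × Nat) × List (Int × Nat)),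
          ∀ w ∈ nbrs, ((w, s.2 ||| 2 ^ w.toNat) : Int × Nat) ∈ (nbrs.foldl (pvInnerB s.2) acc').1 := by
        intro nbrs
        induction nbrs with
        | nil => intro acc' w hw; simp at hw
        | cons w0 rest0 ih0 =>
          intro acc' w hw
          rcases List.mem_cons.mp hw with hw | hw
          · subst hw
            simp only [List.foldl_cons]
            apply pvInnerB_set_mono
            by_cases hm : ((w, s.2 ||| 2 ^ w.toNat) : Int × Nat) ∈ acc'.1
            · simp [pvInnerB, hm]
            · simp only [pvInnerB, hm, if_false]
              simp [PySem.Set.mem_add]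
          · simp only [List.foldl_cons]
            exact ih0 _ w hw
      exact hin _ acc v hv
    · simp only [List.foldl_cons]
      exact ih _ s hs v hv

lemma pvExtract_neg (cheio : Nat) (L : List ((Int × Nat) × Int))
    (h : ∀ it ∈ L, it.1.2 ≠ cheio) : pvExtractAlt cheio (PySem.Dict.mk L) = -1 := by
  have hfil : L.filter (fun it => it.1.2 == cheio) = [] := by
    simp only [List.filter_eq_nil_iff]
    intro it hit
    simpa using h it hit
  show (match PySem.List.min? ((((PySem.Dict.mk L).items.filter (fun it => it.1.2 == cheio)).map (fun it => it.2))) (fun x => x) with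
        | some m => m
        | none => -1) = -1
  have : (PySem.Dict.mk L).items = L := rfl
  rw [this, hfil]
  simp [PySem.List.min?]

lemma pvExtract_eq_d (cheio : Nat) (P : List ((Int × Nat) × Int)) (F : List (Int × Nat))
    (T : List ((Int × Nat) × Int)) (d : Int)
    (hP : ∀ it ∈ P, it.1.2 ≠ cheio) (hF : ∃ s ∈ F, s.2 = cheio)
    (hT : ∀ it ∈ T, d + 1 ≤ it.2) :
    pvExtractAlt cheio (PySem.Dict.mk (P ++ F.map (pvEnt d) ++ T)) = d := by
  obtain ⟨s0, hs0, hs0full⟩ := hF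
  set L := P ++ F.map (pvEnt d) ++ T with hL
  set finais := ((L.filter (fun it => it.1.2 == cheio)).map (fun it => it.2)) with hfin
  have hdmem : d ∈ finais := by
    rw [hfin]
    apply List.mem_map.mpr
    refine ⟨(s0, d), ?_, rfl⟩
    apply List.mem_filter.mpr
    refine ⟨?_, by simpa using hs0full⟩
    rw [hL]
    exact List.mem_append_left _ (List.mem_append_right _ (List.mem_map.mpr ⟨s0, hs0, rfl⟩))
  have hlb : ∀ x ∈ finais, d ≤ x := by
    intro x hx
    rw [hfin] at hx
    obtain ⟨it, hit, rfl⟩ := List.mem_map.mp hx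
    have hmem := (List.mem_filter.mp hit).1
    have hfull : it.1.2 = cheio := by simpa using (List.mem_filter.mp hit).2
    rw [hL] at hmem
    rcases List.mem_append.mp hmem with hmem | hmem
    · rcases List.mem_append.mp hmem with hmem | hmem
      · exact absurd hfull (hP it hmem)
      · obtain ⟨x0, _, rfl⟩ := List.mem_map.mp hmem
        simp [pvEnt]
    · have := hT it hmem; omega
  show (match PySem.List.min? finais (fun x => x) with
        | some m => m
        | none => -1) = d
  cases hmin : PySem.List.min? finais (fun x => x) with
  | none =>
    rw [PySem.List.min?_eq_none_iff] at hmin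
    rw [hmin] at hdmem
    simp at hdmem
  | some m =>
    have h1 : d ≤ m := hlb m (PySem.List.min?_mem hmin)
    have h2 : m ≤ d := PySem.List.min?_isMin hmin d hdmem
    simp only []
    omega

lemma pvC_next (grafo : List (List Int)) (P : List ((Int × Nat) × Int))
    (F : List (Int × Nat)) (d : Int)
    (hval : ∀ it ∈ P, it.2 + 1 ≤ d)
    (hC : ∀ it ∈ P, ∀ v ∈ (PySem.List.pyGet? grafo it.1.1).getD [],
      ∃ u, (PySem.Dict.mk (P ++ F.map (pvEnt d))).get? (v, it.1.2 ||| 2 ^ v.toNat) = some u ∧ u ≤ it.2 + 1) :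
    ∀ it ∈ P ++ F.map (pvEnt d),
      ∀ v ∈ (PySem.List.pyGet? grafo it.1.1).getD [],
      ∃ u, (PySem.Dict.mk ((P ++ F.map (pvEnt d))
              ++ ((F.foldl (pvStepB grafo) (P.map (·.1) ++ F, [])).2).map (pvEnt (d + 1)))).get?
            (v, it.1.2 ||| 2 ^ v.toNat) = some u ∧ u ≤ it.2 + 1 := by
  set N := (F.foldl (pvStepB grafo) (P.map (·.1) ++ F, [])).2 with hN
  intro it hit v hv
  have hub : ∀ u, (PySem.Dict.mk ((P ++ F.map (pvEnt d)) ++ N.map (pvEnt (d + 1)))).get?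
      (v, it.1.2 ||| 2 ^ v.toNat) = some u → u ≤ d + 1 := by
    intro u hu
    have hm := PySem.Dict.mem_items_of_get?_eq_some _ hu
    have hm' : ((v, it.1.2 ||| 2 ^ v.toNat), u) ∈ (P ++ F.map (pvEnt d)) ++ N.map (pvEnt (d + 1)) := hm
    rcases List.mem_append.mp hm' with h | h
    · rcases List.mem_append.mp h with h | h
      · have := hval _ h; simp only [] at this ⊢; omega
      · obtain ⟨x, _, hx⟩ := List.mem_map.mp h
        have : d = u := congrArg Prod.snd hx
        omega
    · obtain ⟨x, _, hx⟩ := List.mem_map.mp h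
      have : d + 1 = u := congrArg Prod.snd hx
      omega
  rcases List.mem_append.mp hit with h | h
  · obtain ⟨u, hu, hub'⟩ := hC it h v hv
    exact ⟨u, pvGet?_mk_append_left _ _ _ _ hu, hub'⟩
  · obtain ⟨x, hx, rfl⟩ := List.mem_map.mp h
    have hmemset : ((v, x.2 ||| 2 ^ v.toNat) : Int × Nat)
        ∈ (F.foldl (pvStepB grafo) (P.map (·.1) ++ F, [])).1 :=
      pvSucc_mem grafo F _ x hx v (by simpa [pvEnt] using hv)
    have hstr := pvLayer_structure grafo F (P.map (·.1) ++ F)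
    rw [hstr, ← hN] at hmemset
    have hkeys : ((P ++ F.map (pvEnt d)) ++ N.map (pvEnt (d + 1))).map (·.1)
        = (P.map (·.1) ++ F) ++ N := by
      simp [pvEnt, Function.comp_def]
    have hmemkeys : ((v, x.2 ||| 2 ^ v.toNat) : Int × Nat)
        ∈ (PySem.Dict.mk ((P ++ F.map (pvEnt d)) ++ N.map (pvEnt (d + 1)))).keys := by
      show _ ∈ ((P ++ F.map (pvEnt d)) ++ N.map (pvEnt (d + 1))).map (·.1)
      rw [hkeys]
      exact hmemset
    obtain ⟨u, hu⟩ := pvGet?_some_of_mem_keys _ _ hmemkeys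
    refine ⟨u, by simpa [pvEnt] using hu, ?_⟩
    have := hub u (by simpa [pvEnt] using hu)
    simp [pvEnt]
    omega

lemma pvBridge (grafo : List (List Int)) (cheio : Nat)
    (hpre : ∀ row ∈ grafo, ∀ v ∈ row, 0 ≤ v ∧ v < (grafo.length : Int)) :
    ∀ (fB : Nat) (P : List ((Int × Nat) × Int)) (F : List (Int × Nat)) (d : Int),
    ((P.map (·.1) ++ F) : List (Int × Nat)).Nodup →
    (∀ it ∈ P, it.2 + 1 ≤ d) →
    (∀ it ∈ P, ∀ v ∈ (PySem.List.pyGet? grafo it.1.1).getD [],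
      ∃ u, (PySem.Dict.mk (P ++ F.map (pvEnt d))).get? (v, it.1.2 ||| 2 ^ v.toNat) = some u ∧ u ≤ it.2 + 1) →
    (∀ it ∈ P, it.1.2 ≠ cheio) →
    (∀ s ∈ P.map (·.1) ++ F, pvValid grafo.length s) →
    grafo.length * 2 ^ grafo.length - (P.map (·.1) ++ F).length < fB →
    (P.map (·.1) ++ F).length ≤ grafo.length * 2 ^ grafo.length →
    pvExtractAlt cheio (pvWhileAlt grafo cheio fB (PySem.Dict.mk (P ++ F.map (pvEnt d))))
      = pvLoopL grafo cheio fB F (P.map (·.1) ++ F) d := by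
  intro fB
  induction fB with
  | zero => intro P F d hnd hval hC hNF hvalid hfB hlen; omega
  | succ fB ih =>
    intro P F d hnd hval hC hNF hvalid hfB hlen
    have hkeysPF : (PySem.Dict.mk (P ++ F.map (pvEnt d))).keys = P.map (·.1) ++ F := by
      show (P ++ F.map (pvEnt d)).map (·.1) = P.map (·.1) ++ F
      simp [pvEnt, Function.comp_def]
    cases F with
    | nil =>
      rw [pvLoopL_nil]
      rw [pvWhileAlt]
      have hguard : ((PySem.Dict.mk (P ++ ([] : List (Int × Nat)).map (pvEnt d))).keys.any
          (fun k => k.2 == cheio)) = false := by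
        rw [hkeysPF]
        simp only [List.append_nil, List.any_eq_false]
        intro x hx
        obtain ⟨it, hit, rfl⟩ := List.mem_map.mp hx
        simpa using hNF it hit
      rw [hguard]
      simp only [Bool.false_eq_true, if_false]
      rw [pvRound_eq grafo P [] d hval hC]
      simp only [List.foldl_nil, List.map_nil, List.append_nil, List.isEmpty_nil,
        Bool.not_true, Bool.false_eq_true, if_false]
      exact pvExtract_neg cheio P hNF
    | cons s tl =>
      rw [pvLoopL]
      by_cases hany : ((s :: tl).any (fun x => x.2 == cheio)) = true
      · simp only [hany, if_true]
        rw [pvWhileAlt]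
        have hguard : ((PySem.Dict.mk (P ++ (s :: tl).map (pvEnt d))).keys.any
            (fun k => k.2 == cheio)) = true := by
          rw [hkeysPF]
          obtain ⟨s0, hs0, hs0f⟩ := List.any_eq_true.mp hany
          exact List.any_eq_true.mpr ⟨s0, List.mem_append_right _ hs0, hs0f⟩
        rw [hguard]
        simp only [if_true]
        obtain ⟨s0, hs0, hs0f⟩ : ∃ x ∈ s :: tl, (x.2 == cheio) = true := List.any_eq_true.mp hany
        have := pvExtract_eq_d cheio P (s :: tl) [] d hNF ⟨s0, hs0, by simpa using hs0f⟩ (by simp)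
        simpa using this
      · simp only [Bool.not_eq_true] at hany
        simp only [hany, Bool.false_eq_true, if_false]
        have hanyF : ∀ x ∈ s :: tl, x.2 ≠ cheio := by
          intro x hx
          have := List.any_eq_false.mp hany x hx
          simpa using this
        rw [pvWhileAlt]
        have hguard : ((PySem.Dict.mk (P ++ (s :: tl).map (pvEnt d))).keys.any
            (fun k => k.2 == cheio)) = false := by
          rw [hkeysPF]
          simp only [List.any_eq_false]
          intro x hx
          rcases List.mem_append.mp hx with h | h
          · obtain ⟨it, hit, rfl⟩ := List.mem_map.mp h
            simpa using hNF it hit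
          · simpa using hanyF x h
        rw [hguard]
        simp only [Bool.false_eq_true, if_false]
        rw [pvRound_eq grafo P (s :: tl) d hval hC]
        set vis := P.map (·.1) ++ (s :: tl) with hvis
        set N := ((s :: tl).foldl (pvStepB grafo) (vis, [])).2 with hN
        have hstr := pvLayer_structure grafo (s :: tl) vis
        rw [← hN] at hstr
        cases hNe : N with
        | nil =>
          simp only [List.isEmpty_nil, Bool.not_true, Bool.false_eq_true, if_false,
            List.map_nil, List.append_nil]
          rw [pvLoopL_nil]
          apply pvExtract_neg
          intro it hit
          rcases List.mem_append.mp hit with h | h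
          · exact hNF it h
          · obtain ⟨x, hx, rfl⟩ := List.mem_map.mp h
            simpa [pvEnt] using hanyF x hx
        | cons y ys =>
          simp only [List.isEmpty_cons, Bool.not_false, if_true]
          rw [← hNe]
          -- recurse
          have hval1 : ∀ it ∈ P ++ (s :: tl).map (pvEnt d), it.2 + 1 ≤ d + 1 := by
            intro it hit
            rcases List.mem_append.mp hit with h | h
            · have := hval it h; omega
            · obtain ⟨x, _, rfl⟩ := List.mem_map.mp h
              simp [pvEnt]
          have hC1 := pvC_next grafo P (s :: tl) d hval hC
          rw [← hvis, ← hN] at hC1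
          have hNF1 : ∀ it ∈ P ++ (s :: tl).map (pvEnt d), it.1.2 ≠ cheio := by
            intro it hit
            rcases List.mem_append.mp hit with h | h
            · exact hNF it h
            · obtain ⟨x, hx, rfl⟩ := List.mem_map.mp h
              simpa [pvEnt] using hanyF x hx
          have hkeys1 : (P ++ (s :: tl).map (pvEnt d)).map (·.1) = vis := by
            rw [hvis]; simp [pvEnt, Function.comp_def]
          have hnd1 : (((P ++ (s :: tl).map (pvEnt d)).map (·.1)) ++ N).Nodup := by
            rw [hkeys1, ← hstr]
            exact pvLayer_nodup grafo (s :: tl) vis hnd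
          have hmask : ∀ x ∈ s :: tl, x.2 < 2 ^ grafo.length := by
            intro x hx
            exact (hvalid x (List.mem_append_right _ hx)).2.2
          have hvalid1 : ∀ x ∈ ((P ++ (s :: tl).map (pvEnt d)).map (·.1)) ++ N, pvValid grafo.length x := by
            rw [hkeys1, ← hstr]
            exact pvLayer_valid grafo hpre (s :: tl) vis hmask hvalid
          have hlen1 : (((P ++ (s :: tl).map (pvEnt d)).map (·.1)) ++ N).length
              ≤ grafo.length * 2 ^ grafo.length := by
            rw [hkeys1, ← hstr]
            exact pvLen_bound grafo.length _ (by rw [hstr]; exact (by rw [← hstr]; exact pvLayer_nodup grafo (s :: tl) vis hnd))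
              (by rw [hstr]; exact (by rw [← hstr]; exact pvLayer_valid grafo hpre (s :: tl) vis hmask hvalid))
          have hfB1 : grafo.length * 2 ^ grafo.length
              - (((P ++ (s :: tl).map (pvEnt d)).map (·.1)) ++ N).length < fB := by
            rw [hkeys1]
            have h1 : (vis ++ N).length = vis.length + N.length := by simp
            have h2 : 1 ≤ N.length := by rw [hNe]; simp
            simp only [List.length_append] at hfB ⊢
            rw [hkeys1] at hlen1
            simp only [List.length_append] at hlen1
            omega
          have hrec := ih (P ++ (s :: tl).map (pvEnt d)) N (d + 1) hnd1 hval1 hC1 hNF1 hvalid1 hfB1 hlen1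
          rw [List.append_assoc] at hrec ⊢
          rw [hrec, hkeys1, hstr]

-- ===== VERDICT =====
theorem menorCaminhoQueVisitaTodosOsNos_spec : Claim_equal_menorCaminhoQueVisitaTodosOsNos := by
  intro grafo _ hpre
  unfold Spec_menorCaminhoQueVisitaTodosOsNos
  rcases hpre with hsmall | hpre
  · -- 0 or 1 nodes: both programs answer before looking at any list entry
    match grafo, hsmall with
    | [], _ => rfl
    | [row], _ => rfl
  unfold menorCaminhoQueVisitaTodosOsNos menorCaminhoQueVisitaTodosOsNos_alt
  dsimp only
  set n := grafo.length with hn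
  set F0 : List (Int × Nat) := (List.range n).map (fun (i : Nat) => ((i : Int), (2 ^ i : Nat))) with hF0
  have hnodup : F0.Nodup := by
    refine List.Nodup.map ?_ (List.nodup_range)
    intro a b hab
    have : (a : Int) = (b : Int) := congrArg Prod.fst hab
    exact_mod_cast this
  have hofList : PySem.Set.ofList F0 = F0 := PySem.Set.ofList_eq_self_of_nodup _ hnodup
  have hmap : (List.range n).map (fun (i : Nat) => ((i : Int), (2 ^ i : Nat), (0 : Int)))
      = F0.map (pvTag 0) := by
    rw [hF0, List.map_map]
    rfl
  have hv : ∀ x ∈ F0, pvValid grafo.length x := by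
    intro x hx
    rw [hF0] at hx
    obtain ⟨i, hi, rfl⟩ := List.mem_map.mp hx
    have hin : i < n := List.mem_range.mp hi
    refine ⟨Int.natCast_nonneg i, ?_, ?_⟩
    · show (i : Int) < (grafo.length : Int)
      rw [← hn]; exact_mod_cast hin
    · show 2 ^ i < 2 ^ grafo.length
      rw [← hn]; exact Nat.pow_lt_pow_right (by norm_num) hin
  have hlen0 : F0.length = n := by simp [hF0]
  have hpos : 0 < 2 ^ n := Nat.two_pow_pos n
  have hnle : n ≤ n * 2 ^ n := Nat.le_mul_of_pos_right n hpos
  have hnn : grafo.length * 2 ^ grafo.length = n * 2 ^ n := rfl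
  have hA := pvLoopA_eq_pvLoopL grafo (2 ^ n - 1) hpre (n * 2 ^ n + 1) F0 F0 0 (n * 2 ^ n + 1)
    hv hnodup (fun s hs => hs)
    (by simp only [hlen0, hnn]; omega)
    (by simp only [hlen0, hnn]; omega)
    (by simp only [hlen0, hnn]; omega)
  rw [hofList, hmap, hA]
  -- B side
  have hitems : ((List.range n).foldl
      (fun (d : PySem.Dict (Int × Nat) Int) (i : Nat) => d.insert ((i : Int), (2 ^ i : Nat)) (0 : Int))
      PySem.Dict.empty).items = F0.map (pvEnt 0) := by
    rw [PySem.Dict.items_foldl_insert_fresh]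
    · show ([] : List ((Int × Nat) × Int)) ++ _ = _
      rw [List.nil_append, hF0, List.map_map]
      rfl
    · intro a _; rfl
    · exact (by simpa [hF0] using hnodup)
  have hdict : ((List.range n).foldl
      (fun (d : PySem.Dict (Int × Nat) Int) (i : Nat) => d.insert ((i : Int), (2 ^ i : Nat)) (0 : Int))
      PySem.Dict.empty) = PySem.Dict.mk (F0.map (pvEnt 0)) := PySem.Dict.ext hitems
  have hB := pvBridge grafo (2 ^ n - 1) hpre (n * 2 ^ n + 1) [] F0 0
    (by simpa using hnodup)
    (by simp)
    (by simp)
    (by simp)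
    (by simpa using hv)
    (by simp only [List.map_nil, List.nil_append, hlen0, hnn]; omega)
    (by simp only [List.map_nil, List.nil_append, hlen0, hnn]; omega)
  simp only [List.map_nil, List.nil_append] at hB
  rw [hdict, hB]
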